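-- pv_equiv track=rewrite | github.com/izjoker/Algorithm-Problems | baekjoon/16637/sol.py | pickOps
-- ===== SOURCE A (Python) =====
-- def pickOps(opsidxs, n):
--     r = []
--     if n == 0:
--         return []
--     if n == 1:
--         for idx in opsidxs:
--             r += [[idx]]
--         return r
--     for i, idx in enumerate(opsidxs):
--         idxs = opsidxs[i+2:]
--         r += [[idx] + e for e in pickOps(idxs, n-1)]
--     return r
-- ===== SOURCE B (Python) =====
-- def pickOps(opsidxs, n):
--     # Generate-and-filter: enumerate all n-combinations of positions (lexicographic),
--     # keep those whose consecutive positions differ by at least 2, map back to values.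
--     if n <= 0:
--         return []
--
--     def combs(k, xs):
--         if k == 0:
--             return [[]]
--         if not xs:
--             return []
--         return [[xs[0]] + c for c in combs(k - 1, xs[1:])] + combs(k, xs[1:])
--
--     res = []
--     for combo in combs(n, list(range(len(opsidxs)))):
--         if all(b - a >= 2 for a, b in zip(combo, combo[1:])):
--             res.append([opsidxs[p] for p in combo])
--     return res
-- ===== Notes on version B (the rewrite author's own statement) =====
-- stated objective: alternative
-- what changed: Replaces A's pruned recursion over value-suffixes (slicing off i+2 elements and special-casing n==1) by a flat generate-and-filter pass: enumerate all n-combinations of positions in lexicographic order, keep those whose consecutive positions differ by at least 2, and map positions back to values.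
import Mathlib
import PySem

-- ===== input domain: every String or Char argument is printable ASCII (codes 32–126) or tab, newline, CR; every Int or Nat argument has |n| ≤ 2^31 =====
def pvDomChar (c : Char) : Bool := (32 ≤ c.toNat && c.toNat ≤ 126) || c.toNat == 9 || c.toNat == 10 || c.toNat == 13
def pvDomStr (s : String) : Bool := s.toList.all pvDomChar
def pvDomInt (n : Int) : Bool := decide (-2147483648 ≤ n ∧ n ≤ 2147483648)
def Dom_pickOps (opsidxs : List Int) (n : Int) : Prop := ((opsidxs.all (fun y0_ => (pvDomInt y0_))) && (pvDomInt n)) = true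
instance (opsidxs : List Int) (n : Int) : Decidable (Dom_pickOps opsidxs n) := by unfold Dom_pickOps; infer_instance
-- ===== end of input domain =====

-- B replaces A's pruned recursion by generate-and-filter over position combinations (objective: alternative).


-- ===== PORT A =====
-- Literal port of A: the `for i, idx in enumerate(opsidxs)` loop with `idxs = opsidxs[i+2:]`
-- becomes the structural loop pickOpsLoop (at element x with tail xs, opsidxs[i+2:] = xs.drop 1).
mutual
def pickOps (opsidxs : List Int) (n : Int) : List (List Int) :=
  if n = 0 then []
  else if n = 1 then opsidxs.map (fun idx => [idx])
  else pickOpsLoop opsidxs n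
termination_by (opsidxs.length, 1)

def pickOpsLoop (opsidxs : List Int) (n : Int) : List (List Int) :=
  match opsidxs with
  | [] => []
  | x :: xs => ((pickOps (xs.drop 1) (n - 1)).map (fun e => x :: e)) ++ pickOpsLoop xs n
termination_by (opsidxs.length, 0)
decreasing_by
  · exact Prod.Lex.left _ _ (by simp)
  · exact Prod.Lex.left _ _ (by simp)
end

-- ===== PORT B =====
-- combsB ports Source B's recursive `combs` (lexicographic k-combinations).
def combsB (k : Nat) (ps : List Nat) : List (List Nat) :=
  match k, ps with
  | 0, _ => [[]]
  | _ + 1, [] => []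
  | k' + 1, x :: xs => ((combsB k' xs).map (fun c => x :: c)) ++ combsB (k' + 1) xs

-- ports `all(b - a >= 2 for a, b in zip(combo, combo[1:]))`
def spacedB (c : List Nat) : Bool := (c.zip c.tail).all (fun ab => decide (ab.1 + 2 ≤ ab.2))

-- positions p satisfy 0 ≤ p < len, where Python list indexing is exactly getD
def pickOps_alt (opsidxs : List Int) (n : Int) : List (List Int) :=
  if n ≤ 0 then []
  else ((combsB n.toNat (List.range opsidxs.length)).filter spacedB).map
        (fun c => c.map (fun p => opsidxs.getD p 0))

-- ===== PRECONDITION & SPEC =====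
def Spec_pickOps (opsidxs : List Int) (n : Int) (out : List (List Int)) : Prop := out = pickOps_alt opsidxs n
instance (opsidxs : List Int) (n : Int) (out : List (List Int)) : Decidable (Spec_pickOps opsidxs n out) := by unfold Spec_pickOps; infer_instance

-- ===== CLAIM (what is proved, stated in full; the proofs are below) =====
def Claim_equal_pickOps : Prop := ∀ (opsidxs : List Int) (n : Int), Dom_pickOps opsidxs n → Spec_pickOps opsidxs n (pickOps opsidxs n)

-- ===== LEMMAS AND PROOFS =====

def pvEmb (l : List Int) (c : List Nat) : List Int := c.map (fun p => l.getD p 0)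

def pvRHS (l : List Int) (k : Nat) : List (List Int) :=
  ((combsB k (List.range l.length)).filter spacedB).map (pvEmb l)

theorem length_of_mem_combsB : ∀ (ps : List Nat) (k : Nat) (c : List Nat), c ∈ combsB k ps → c.length = k := by
  intro ps
  induction ps with
  | nil =>
      intro k c h
      cases k with
      | zero => simp [combsB] at h; simp [h]
      | succ k' => simp [combsB] at h
  | cons x xs ih =>
      intro k c h
      cases k with
      | zero => simp [combsB] at h; simp [h]
      | succ k' =>
          simp [combsB] at h
          rcases h with ⟨c', hc', rfl⟩ | h
          · simp [ih k' c' hc']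
          · exact ih (k' + 1) c h

theorem combsB_map (f : Nat → Nat) : ∀ (ps : List Nat) (k : Nat), combsB k (ps.map f) = (combsB k ps).map (List.map f) := by
  intro ps
  induction ps with
  | nil => intro k; cases k <;> simp [combsB]
  | cons x xs ih =>
      intro k
      cases k with
      | zero => simp [combsB]
      | succ k' =>
          simp only [List.map_cons, combsB, ih, List.map_append, List.map_map]
          rfl

theorem spacedB_cons2 (a b : Nat) (t : List Nat) :
    spacedB (a :: b :: t) = (decide (a + 2 ≤ b) && spacedB (b :: t)) := rfl

theorem spacedB_shift (s : Nat) : ∀ c : List Nat, spacedB (c.map (· + s)) = spacedB c := by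
  intro c
  induction c with
  | nil => rfl
  | cons a t ih =>
      cases t with
      | nil => rfl
      | cons b t' =>
          have h : (a + s + 2 ≤ b + s) ↔ (a + 2 ≤ b) := by omega
          simp only [List.map_cons] at ih ⊢
          rw [spacedB_cons2, spacedB_cons2, ih, decide_eq_decide.mpr h]

theorem map_getD_range : ∀ (l : List Int), (List.range l.length).map (fun p => l.getD p 0) = l := by
  intro l
  induction l with
  | nil => simp
  | cons x xs ih =>
      simp only [List.length_cons, List.range_succ_eq_map, List.map_cons, List.map_map, List.getD_cons_zero]
      have hfun : ((fun p => (x :: xs).getD p 0) ∘ Nat.succ) = (fun p => xs.getD p 0) := by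
        funext p; simp
      rw [hfun, ih]

theorem combsB_one : ∀ ps : List Nat, combsB 1 ps = ps.map (fun x => [x]) := by
  intro ps
  induction ps with
  | nil => rfl
  | cons x xs ih => simp [combsB, ih]

theorem map_succ_eq : List.map Nat.succ = List.map (fun p : Nat => p + 1) := by
  funext l; simp

theorem combsB_filter_head (j : Nat) : ∀ m : Nat,
    (combsB (j + 1) (List.range m)).filter (fun c => decide (1 ≤ c.headD 0)) =
      (combsB (j + 1) (List.range (m - 1))).map (List.map (fun p : Nat => p + 1)) := by
  intro m
  cases m with
  | zero => simp [combsB]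
  | succ t =>
      rw [List.range_succ_eq_map, map_succ_eq]
      simp only [combsB, List.filter_append, combsB_map]
      rw [List.filter_map, List.filter_map]
      have h1 : ((combsB j (List.range t)).filter
          (((fun c => decide (1 ≤ c.headD 0)) ∘ (fun c => (0 : Nat) :: c)) ∘ List.map (fun p : Nat => p + 1))) = [] := by
        apply List.filter_eq_nil_iff.mpr
        intro c _
        simp [Function.comp]
      have h2 : ((combsB (j + 1) (List.range t)).filter
          ((fun c => decide (1 ≤ c.headD 0)) ∘ List.map (fun p : Nat => p + 1))) =
          combsB (j + 1) (List.range t) := by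
        apply List.filter_eq_self.mpr
        intro c hc
        have hlen := length_of_mem_combsB _ _ _ hc
        cases c with
        | nil => simp at hlen
        | cons a t' => simp [Function.comp]
      rw [List.filter_map]
      rw [h1, h2]
      simp

theorem pickOps_neg : ∀ (m : Nat) (l : List Int), l.length ≤ m → ∀ n : Int, n < 0 →
    pickOpsLoop l n = [] ∧ pickOps l n = [] := by
  intro m
  induction m with
  | zero =>
      intro l hl n hn
      have hnil : l = [] := by cases l with | nil => rfl | cons a t => simp at hl
      subst hnil
      have hloop : pickOpsLoop ([] : List Int) n = [] := by rw [pickOpsLoop]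
      exact ⟨hloop, by rw [pickOps, if_neg (by omega), if_neg (by omega)]; exact hloop⟩
  | succ m ih =>
      intro l hl n hn
      have hloop : pickOpsLoop l n = [] := by
        cases l with
        | nil => rw [pickOpsLoop]
        | cons x xs =>
            rw [pickOpsLoop]
            have h1 := (ih xs.tail (by simp [List.length_tail] at hl ⊢; omega) (n - 1) (by omega)).2
            have h2 := (ih xs (by simp at hl; omega) n hn).1
            simp [h1, h2]
      exact ⟨hloop, by rw [pickOps, if_neg (by omega), if_neg (by omega)]; exact hloop⟩

theorem spaced_zero_cons (c : List Nat) (hne : c ≠ []) :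
    spacedB (0 :: List.map (fun p : Nat => p + 1) c) = (decide (1 ≤ c.headD 0) && spacedB c) := by
  cases c with
  | nil => exact absurd rfl hne
  | cons a t =>
      have h1 : (0 : Nat) :: List.map (fun p : Nat => p + 1) (a :: t)
          = 0 :: (a + 1) :: List.map (fun p : Nat => p + 1) t := by simp
      rw [h1, spacedB_cons2]
      have h2 : (a + 1) :: List.map (fun p : Nat => p + 1) t = List.map (· + 1) (a :: t) := by simp
      rw [h2, spacedB_shift]
      have h3 : (0 + 2 ≤ a + 1) ↔ (1 ≤ (a :: t).headD 0) := by simp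
      rw [decide_eq_decide.mpr h3]

theorem spacedB_comp_shift : (spacedB ∘ List.map (fun p : Nat => p + 1)) = spacedB :=
  funext fun c => spacedB_shift 1 c

theorem chunkB (k' : Nat) (x : Int) (xs : List Int) :
    (List.filter spacedB ((combsB k' (List.range xs.length)).map (List.map (fun p : Nat => p + 1)))).map (pvEmb (x :: xs)) =
    ((combsB k' (List.range xs.length)).filter spacedB).map (pvEmb xs) := by
  rw [List.filter_map, spacedB_comp_shift, List.map_map]
  congr 1
  funext c
  simp [pvEmb, Function.comp, List.map_map]

theorem pvRHS_cons (k : Nat) (x : Int) (xs : List Int) :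
    pvRHS (x :: xs) (k + 2) = ((pvRHS xs.tail (k + 1)).map (fun e => x :: e)) ++ pvRHS xs (k + 2) := by
  unfold pvRHS
  rw [List.length_cons, List.range_succ_eq_map, map_succ_eq]
  show (List.filter spacedB (combsB (k + 2) (0 :: (List.range xs.length).map (fun p : Nat => p + 1)))).map (pvEmb (x :: xs)) = _
  rw [show combsB (k + 2) (0 :: (List.range xs.length).map (fun p : Nat => p + 1))
      = ((combsB (k + 1) ((List.range xs.length).map (fun p : Nat => p + 1))).map (fun c => 0 :: c))
        ++ combsB (k + 2) ((List.range xs.length).map (fun p : Nat => p + 1)) from rfl]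
  rw [combsB_map, combsB_map, List.filter_append, List.map_append, chunkB]
  congr 1
  -- chunk A
  rw [List.map_map, List.filter_map]
  have hpred : ∀ c ∈ combsB (k + 1) (List.range xs.length),
      ((spacedB ∘ (fun c => (0 : Nat) :: c) ∘ List.map (fun p : Nat => p + 1)) c)
        = ((fun c => decide (1 ≤ c.headD 0) && spacedB c) c) := by
    intro c hc
    have hlen := length_of_mem_combsB _ _ _ hc
    have hne : c ≠ [] := by intro h; rw [h] at hlen; simp at hlen
    exact spaced_zero_cons c hne
  rw [List.filter_congr hpred]
  have hcomm : (fun c : List Nat => decide (1 ≤ c.headD 0) && spacedB c)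
      = (fun c : List Nat => spacedB c && decide (1 ≤ c.headD 0)) := by
    funext c; exact Bool.and_comm _ _
  rw [hcomm, ← List.filter_filter, combsB_filter_head, List.length_tail]
  rw [List.filter_map, spacedB_comp_shift]
  simp only [List.map_map]
  apply List.map_congr_left
  intro c hc
  simp [pvEmb, Function.comp, List.map_map]

theorem loop_main (k : Nat)
    (hk : ∀ l : List Int, pickOps l ((k : Int) + 1) = pvRHS l (k + 1)) :
    ∀ l : List Int, pickOpsLoop l ((k : Int) + 2) = pvRHS l (k + 2) := by
  intro l
  induction l with
  | nil => rw [pickOpsLoop]; simp [pvRHS, combsB]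
  | cons x xs ih =>
      rw [pickOpsLoop]
      have he : (k : Int) + 2 - 1 = (k : Int) + 1 := by ring
      rw [he, hk, ih, List.drop_one, pvRHS_cons]

theorem main_pos (k : Nat) : ∀ l : List Int, pickOps l ((k : Int) + 1) = pvRHS l (k + 1) := by
  induction k with
  | zero =>
      intro l
      rw [pickOps, if_neg (by omega), if_pos (by norm_num)]
      rw [pvRHS, combsB_one, List.filter_map]
      have hp : (spacedB ∘ fun x : Nat => [x]) = fun _ => true := by funext c; rfl
      rw [hp, List.filter_true, List.map_map]
      rw [show (pvEmb l ∘ fun x : Nat => [x]) = ((fun v : Int => [v]) ∘ (fun p => l.getD p 0)) from rfl,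
        ← List.map_map, map_getD_range]
  | succ k ih =>
      intro l
      have hc : ((k + 1 : Nat) : Int) + 1 = (k : Int) + 2 := by push_cast; ring
      rw [hc, pickOps, if_neg (by omega), if_neg (by omega)]
      exact loop_main k ih l

-- ===== VERDICT (by name: the statement is the Claim_ definition above) =====
theorem pickOps_spec : Claim_equal_pickOps := by
  intro l n _
  show pickOps l n = pickOps_alt l n
  by_cases h : n ≤ 0
  · rcases eq_or_lt_of_le h with rfl | h'
    · simp [pickOps, pickOps_alt]
    · rw [(pickOps_neg l.length l le_rfl n h').2, pickOps_alt, if_pos h]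
  · have hk : n = ((n.toNat - 1 : Nat) : Int) + 1 := by omega
    have htn : n.toNat = (n.toNat - 1) + 1 := by omega
    have hmain := main_pos (n.toNat - 1) l
    rw [← hk, ← htn] at hmain
    rw [hmain]
    simp [pickOps_alt, pvRHS, pvEmb, h]
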